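-- pv_equiv track=rewrite | github.com/Bendycar/Coursera-Bioinformatics | Coursera Bioinformatics Ch.2.py | FasterSymbolArray
-- ===== SOURCE A (Python) =====
-- def PatternCount(Pattern, Text):
--     counter = 0
--     for i in range(len(Text) -len(Pattern) + 1):
--         if Text[i:i + len(Pattern)] == Pattern:
--             counter += 1
--
--     return counter
--
-- def FasterSymbolArray(Genome, symbol):
--     array = {}
--     n = len(Genome)
--     ExtendedGenome = Genome + Genome[0:n//2]
--
--     array[0] = PatternCount(symbol, Genome[0:n//2])
--
--     for i in range(1,n):
--
--         array[i] = array[i-1]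
--         if ExtendedGenome[i-1] == symbol:
--             array[i] = array[i] - 1
--         if ExtendedGenome[i+(n//2)-1] == symbol:
--             array[i] = array[i] + 1
--     return array
-- ===== SOURCE B (Python) =====
-- def PatternCount(Pattern, Text):
--     return sum(1 if Text.startswith(Pattern, i) else 0
--                for i in range(len(Text) - len(Pattern) + 1))
--
-- def FasterSymbolArray(Genome, symbol):
--     n = len(Genome)
--     half = n // 2
--     ExtendedGenome = Genome + Genome[:half]
--     # prefix[k] = occurrences of symbol among the first k characters of ExtendedGenome
--     prefix = [0]
--     for ch in ExtendedGenome: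
--         prefix.append(prefix[-1] + (1 if ch == symbol else 0))
--     first = PatternCount(symbol, Genome[:half])
--     array = {0: first}
--     for i in range(1, n):
--         array[i] = first - prefix[i] + prefix[i + half] - prefix[half]
--     return array
-- ===== Notes on version B (the rewrite author's own statement) =====
-- stated objective: alternative
-- what changed: Replaces the stateful sliding-window recurrence (each window count derived from the previous via two character tests on a running accumulator stored in the dict) by a prefix-count table over ExtendedGenome, from which every window's value is computed independently in closed form; PatternCount is rewritten as a sum of startswith tests instead of a counter loop over slice comparisons.
import Mathlib
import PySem

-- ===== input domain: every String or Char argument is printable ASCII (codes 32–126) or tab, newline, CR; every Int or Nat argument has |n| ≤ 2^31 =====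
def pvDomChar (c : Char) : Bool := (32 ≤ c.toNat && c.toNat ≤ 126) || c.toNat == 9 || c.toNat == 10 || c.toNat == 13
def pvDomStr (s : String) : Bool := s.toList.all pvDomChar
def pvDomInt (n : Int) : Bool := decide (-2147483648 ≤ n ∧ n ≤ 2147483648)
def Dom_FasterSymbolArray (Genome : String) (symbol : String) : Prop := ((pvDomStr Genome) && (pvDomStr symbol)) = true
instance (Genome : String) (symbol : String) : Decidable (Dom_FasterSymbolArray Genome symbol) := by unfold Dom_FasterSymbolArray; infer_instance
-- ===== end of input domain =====

-- B replaces A's stateful sliding-window recurrence by a prefix-count table from which each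
-- window's value is computed independently in closed form (objective: alternative, same cost).

-- ===== PORT A =====
-- Python 'Text[i:i+len(Pattern)] == Pattern' is slice equality; string == string is list equality on code points.
def pvPatternCountA (P T : List Char) : Int :=
  (PySem.List.pyRange 0 ((T.length : Int) - P.length + 1) 1).foldl
    (fun counter i =>
      if PySem.List.slice T (some i) (some (i + (P.length : Int))) == P then counter + 1
      else counter) 0

-- Python 'ExtendedGenome[j] == symbol' compares the 1-character string at j with symbol;
-- every index A uses is in range, so pyGet? is always `some` here.
def pvOneCharEq (o : Option Char) (S : List Char) : Bool :=
  match o with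
  | some c => [c] == S
  | none => false

def FasterSymbolArray (Genome : String) (symbol : String) : List (Int × Int) :=
  let G := Genome.toList
  let S := symbol.toList
  let n : Int := G.length
  let half := PySem.Int.floordiv n 2
  let E := G ++ PySem.List.slice G (some 0) (some half)
  -- array = {}; array[0] = PatternCount(symbol, Genome[0:n//2])
  let d0 : PySem.Dict Int Int :=
    PySem.Dict.empty.insert 0 (pvPatternCountA S (PySem.List.slice G (some 0) (some half)))
  let d := (PySem.List.pyRange 1 n 1).foldl (fun d i =>
    let v := d.getD (i - 1) 0          -- array[i-1]: the key is always present here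
    let v := if pvOneCharEq (PySem.List.pyGet? E (i - 1)) S then v - 1 else v
    let v := if pvOneCharEq (PySem.List.pyGet? E (i + half - 1)) S then v + 1 else v
    d.insert i v) d0
  d.items

-- ===== PORT B =====
-- Python 'Text.startswith(Pattern, i)' with 0 ≤ i is the prefix test on Text[i:] — exact here.
def pvPatternCountB (P T : List Char) : Int :=
  ((PySem.List.pyRange 0 ((T.length : Int) - P.length + 1) 1).map
    (fun i => if PySem.Chars.startswith (T.drop i.toNat) P then (1 : Int) else 0)).sum

-- prefix = [0]; for ch in ExtendedGenome: prefix.append(prefix[-1] + (1 if ch == symbol else 0))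
def pvPrefixCounts (E S : List Char) : List Int :=
  E.foldl (fun pre ch =>
    pre ++ [(PySem.List.pyGet? pre (-1)).getD 0 + (if [ch] == S then 1 else 0)]) [0]

def FasterSymbolArray_alt (Genome : String) (symbol : String) : List (Int × Int) :=
  let G := Genome.toList
  let S := symbol.toList
  let n : Int := G.length
  let half := PySem.Int.floordiv n 2
  let E := G ++ PySem.List.slice G none (some half)
  let pre := pvPrefixCounts E S
  let first := pvPatternCountB S (PySem.List.slice G none (some half))
  let d0 : PySem.Dict Int Int := PySem.Dict.empty.insert 0 first
  -- prefix[k] indices used here are always in range, so pyGetD's default is never read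
  let d := (PySem.List.pyRange 1 n 1).foldl (fun d i =>
    d.insert i (first - PySem.List.pyGetD pre i 0 + PySem.List.pyGetD pre (i + half) 0
                - PySem.List.pyGetD pre half 0)) d0
  d.items

-- ===== PRECONDITION & SPEC =====
def Spec_FasterSymbolArray (Genome : String) (symbol : String) (out : List (Int × Int)) : Prop := out = FasterSymbolArray_alt Genome symbol
instance (Genome : String) (symbol : String) (out : List (Int × Int)) : Decidable (Spec_FasterSymbolArray Genome symbol out) := by unfold Spec_FasterSymbolArray; infer_instance

-- ===== CLAIM (what is proved, stated in full; the proofs are below) =====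
def Claim_equal_FasterSymbolArray : Prop := ∀ (Genome : String) (symbol : String), Dom_FasterSymbolArray Genome symbol → Spec_FasterSymbolArray Genome symbol (FasterSymbolArray Genome symbol)

-- ===== LEMMAS AND PROOFS =====

theorem pvRangeOne (n : Nat) :
    PySem.List.pyRange 1 (n : Int) 1 = (List.range (n - 1)).map (fun (k : Nat) => (k : Int) + 1) := by
  simp only [PySem.List.pyRange]
  norm_num [add_comm]
  rw [show (if 1 < n then n - 1 else 0) = n - 1 by split_ifs with h <;> omega]

-- the two PatternCounts agree: both count the match positions
theorem pvPatternCount_eq (P T : List Char) : pvPatternCountA P T = pvPatternCountB P T := by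
  unfold pvPatternCountA pvPatternCountB
  rw [PySem.List.foldl_if_add_one, PySem.List.sum_map_ite_one_zero, zero_add]
  refine congrArg _ (List.countP_congr ?_)
  intro i hi
  have h0 : 0 ≤ i := (PySem.List.mem_pyRange_one.mp hi).1
  rw [PySem.List.slice_toNat T h0 (by omega)]
  rw [show (i + (P.length : Int)).toNat - i.toNat = P.length by omega]
  simp only [PySem.Chars.startswith, beq_iff_eq]
  constructor
  · intro h
    rw [List.isPrefixOf_iff_prefix]
    exact ⟨_, by rw [← h]; exact List.take_append_drop _ _⟩
  · intro h
    rw [List.isPrefixOf_iff_prefix, List.prefix_iff_eq_take] at h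
    exact h.symm

-- the count of symbol (as a 1-char string) among the first k chars of E
def pvCnt (E S : List Char) (k : Nat) : Int :=
  ((E.take k).countP (fun c => [c] == S) : Int)

theorem pvPrefixCounts_aux (S : List Char) (l : List Char) :
    ∀ (acc : List Int) (last : Int), acc.getLast? = some last →
    l.foldl (fun pre ch =>
        pre ++ [(PySem.List.pyGet? pre (-1)).getD 0 + (if [ch] == S then 1 else 0)]) acc
      = acc ++ (List.range l.length).map
          (fun j => last + ((l.take (j+1)).countP (fun c => [c] == S) : Int)) := by
  induction l with
  | nil => intro acc last _; simp
  | cons ch t ih =>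
    intro acc last hl
    simp only [List.foldl_cons, List.length_cons]
    rw [PySem.List.pyGet?_neg_one, hl]
    simp only [Option.getD_some]
    rw [ih (acc ++ [last + (if [ch] == S then 1 else 0)]) _ List.getLast?_concat]
    rw [List.range_succ_eq_map]
    simp only [List.map_cons, List.map_map, List.append_assoc, List.singleton_append,
      List.take_succ_cons, List.countP_cons, List.take_zero, List.countP_nil]
    congr 1
    · congr 1
      · split_ifs <;> simp
      · apply List.map_congr_left
        intro j _
        simp only [Function.comp_apply]
        push_cast
        split_ifs <;> ring

theorem pvPrefixCounts_eq (E S : List Char) :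
    pvPrefixCounts E S = (List.range (E.length + 1)).map (fun k => pvCnt E S k) := by
  unfold pvPrefixCounts
  rw [pvPrefixCounts_aux S E [0] 0 rfl]
  rw [List.range_succ_eq_map]
  simp only [List.singleton_append, List.map_cons, List.map_map]
  unfold pvCnt
  simp

theorem pvPrefix_get (E S : List Char) (k : Nat) (hk : k ≤ E.length) :
    PySem.List.pyGetD (pvPrefixCounts E S) (k : Int) 0 = pvCnt E S k := by
  rw [pvPrefixCounts_eq, PySem.List.pyGetD_natCast]
  rw [List.getD_eq_getElem?_getD]
  rw [List.getElem?_map]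
  rw [List.getElem?_range (by omega)]
  rfl

theorem pvCnt_succ (E S : List Char) (k : Nat) (hk : k < E.length) :
    pvCnt E S (k + 1) = pvCnt E S k + (if [E[k]] == S then (1 : Int) else 0) := by
  unfold pvCnt
  rw [List.take_succ, List.getElem?_eq_getElem hk]
  simp only [Option.toList_some, List.countP_append, List.countP_cons, List.countP_nil]
  push_cast
  split_ifs <;> ring

-- A's running value after iteration k, unrolled as a recurrence over Nat
def pvAval (a0 : Int) (E S : List Char) (half : Int) : Nat → Int
  | 0 => a0
  | k + 1 =>
    let v := pvAval a0 E S half k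
    let v := if pvOneCharEq (PySem.List.pyGet? E (k : Int)) S then v - 1 else v
    if pvOneCharEq (PySem.List.pyGet? E ((k : Int) + half)) S then v + 1 else v

-- B's closed form for entry k
def pvBval (a0 : Int) (E S : List Char) (h : Nat) (k : Nat) : Int :=
  a0 - pvCnt E S k + pvCnt E S (k + h) - pvCnt E S h

theorem pvAval_eq_pvBval (a0 : Int) (E S : List Char) (h : Nat) (k : Nat)
    (hk : k + h ≤ E.length) :
    pvAval a0 E S (h : Int) k = pvBval a0 E S h k := by
  induction k with
  | zero => unfold pvAval pvBval pvCnt; simp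
  | succ k ih =>
    have hk1 : k + h ≤ E.length := by omega
    have hkE : k < E.length := by omega
    have hkhE : k + h < E.length := by omega
    unfold pvAval pvBval
    rw [ih hk1]
    simp only [pvOneCharEq, PySem.List.pyGet?_natCast, List.getElem?_eq_getElem hkE]
    rw [show ((k : Int) + h) = ((k + h : Nat) : Int) by push_cast; ring]
    simp only [PySem.List.pyGet?_natCast, List.getElem?_eq_getElem hkhE]
    unfold pvBval
    rw [show k + 1 + h = k + h + 1 by omega]
    rw [pvCnt_succ E S k hkE, pvCnt_succ E S (k + h) hkhE]
    split_ifs <;> simp_all <;> ring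

-- A's loop body, named so the invariant below can be proved about it
def pvStepA (E S : List Char) (half : Int) (d : PySem.Dict Int Int) (i : Int) : PySem.Dict Int Int :=
  let v := d.getD (i - 1) 0
  let v := if pvOneCharEq (PySem.List.pyGet? E (i - 1)) S then v - 1 else v
  let v := if pvOneCharEq (PySem.List.pyGet? E (i + half - 1)) S then v + 1 else v
  d.insert i v

-- A's loop: invariant on the items of the accumulated dict
theorem pvAloopS (E S : List Char) (half a0 : Int) (m : Nat) :
    ((List.range m).foldl (fun d (k : Nat) => pvStepA E S half d ((k : Int) + 1))
      ((PySem.Dict.empty : PySem.Dict Int Int).insert 0 a0)).items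
    = (List.range (m+1)).map (fun (k : Nat) => ((k : Int), pvAval a0 E S half k)) := by
  induction m with
  | zero => simp [pvAval]; rfl
  | succ m ih =>
    rw [List.range_succ, List.foldl_append, List.foldl_cons, List.foldl_nil]
    generalize hF : (List.range m).foldl (fun d (k : Nat) => pvStepA E S half d ((k : Int) + 1))
      ((PySem.Dict.empty : PySem.Dict Int Int).insert 0 a0) = F at ih
    have hkeys : F.keys = (List.range (m+1)).map (fun (k : Nat) => (k : Int)) := by
      show F.items.map Prod.fst = _
      rw [ih, List.map_map]; rfl
    have hnodup : F.keys.Nodup := by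
      rw [hkeys]; exact (List.nodup_range).map (fun a b h => by omega)
    have hget : F.getD ((m : Int)) 0 = pvAval a0 E S half m :=
      PySem.Dict.getD_of_mem_items F
        (by rw [ih]; exact List.mem_map.mpr ⟨m, List.mem_range.mpr (by omega), rfl⟩) hnodup 0
    have hcon : F.contains ((m : Int) + 1) = false := by
      rw [PySem.Dict.contains_eq_decide_mem_keys, hkeys]
      simp only [decide_eq_false_iff_not, List.mem_map]
      rintro ⟨k, hk, hke⟩
      have hk' : k < m + 1 := List.mem_range.mp hk
      omega
    unfold pvStepA
    rw [show ((m : Int) + 1 - 1) = (m : Int) by ring, hget]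
    rw [show ((m : Int) + 1 + half - 1) = (m : Int) + half by ring]
    rw [PySem.Dict.items_insert_of_not_contains _ _ hcon, ih]
    rw [List.range_succ (n := m + 1), List.map_append]
    simp [pvAval]

-- the same invariant, restated on the literal (beta/zeta-reduced) loop body of the port
theorem pvAloop (E S : List Char) (half a0 : Int) (m : Nat) :
    (((List.range m).map (fun (k : Nat) => (k : Int) + 1)).foldl (fun (d : PySem.Dict Int Int) (i : Int) =>
        d.insert i
          (if pvOneCharEq (PySem.List.pyGet? E (i + half - 1)) S then
            (if pvOneCharEq (PySem.List.pyGet? E (i - 1)) S then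
              d.getD (i - 1) 0 - 1 else d.getD (i - 1) 0) + 1
           else
            (if pvOneCharEq (PySem.List.pyGet? E (i - 1)) S then
              d.getD (i - 1) 0 - 1 else d.getD (i - 1) 0)))
      (PySem.Dict.empty.insert 0 a0)).items
    = (List.range (m+1)).map (fun (k : Nat) => ((k : Int), pvAval a0 E S half k)) := by
  rw [List.foldl_map]
  exact pvAloopS E S half a0 m

-- ===== VERDICT (by name: the statement is the Claim_ definition above) =====
theorem FasterSymbolArray_spec : Claim_equal_FasterSymbolArray := by
  unfold Claim_equal_FasterSymbolArray Spec_FasterSymbolArray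
  intro Genome symbol _
  unfold FasterSymbolArray FasterSymbolArray_alt
  simp only []
  have hfd : PySem.Int.floordiv ((Genome.toList.length : Int)) 2
      = ((Genome.toList.length / 2 : Nat) : Int) := by
    exact_mod_cast PySem.Int.floordiv_natCast Genome.toList.length 2
  rw [hfd, PySem.List.slice_zero_start, PySem.List.slice_to_natCast]
  rw [pvPatternCount_eq]
  set G := Genome.toList with hG
  set S := symbol.toList with hS
  set h := G.length / 2 with hh
  have hhn : h ≤ G.length := Nat.div_le_self _ _
  have hEl : (G ++ G.take h).length = G.length + h := by
    simp [List.length_take]; omega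
  rw [pvRangeOne G.length]
  rw [pvAloop (G ++ G.take h) S ((h : Nat) : Int) (pvPatternCountB S (G.take h)) (G.length - 1)]
  rw [PySem.Dict.items_foldl_insert_fresh ((List.range (G.length - 1)).map (fun (k : Nat) => (k : Int) + 1))
        (fun a => a) _ _
        (fun a ha => by
          obtain ⟨k, _, hk⟩ := List.mem_map.mp ha
          rw [PySem.Dict.contains_insert]
          simp only [PySem.Dict.contains_empty, Bool.or_false]
          rw [beq_eq_false_iff_ne]
          omega)
        (by
          simp only [List.map_id']
          refine List.Nodup.map ?_ List.nodup_range
          intro a b hab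
          simp only at hab
          omega)]
  have hd0 : ((PySem.Dict.empty : PySem.Dict Int Int).insert 0 (pvPatternCountB S (G.take h))).items
      = [(0, pvPatternCountB S (G.take h))] := rfl
  rw [hd0]
  simp only [List.range_succ_eq_map, List.map_cons, List.map_map, Nat.cast_zero,
    List.singleton_append]
  congr 1
  apply List.map_congr_left
  intro k hk
  have hk' : k < G.length - 1 := List.mem_range.mp hk
  simp only [Function.comp_apply]
  rw [Prod.mk.injEq]
  constructor
  · push_cast; ring
  · rw [pvAval_eq_pvBval _ _ _ h (k + 1) (by rw [hEl]; omega)]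
    unfold pvBval
    rw [show ((k : Int) + 1) = (((k + 1 : Nat)) : Int) by push_cast; ring]
    rw [show (((k + 1 : Nat)) : Int) + ((h : Nat) : Int) = (((k + 1 + h : Nat)) : Int) by push_cast; ring]
    rw [pvPrefix_get _ _ _ (by rw [hEl]; omega),
        pvPrefix_get _ _ _ (by rw [hEl]; omega),
        pvPrefix_get _ _ _ (by rw [hEl]; omega)]
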